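-- pv_equiv track=rewrite | github.com/cax68080/AtCoder_Python | abc238/contest_b.py | fab
-- ===== SOURCE A (Python) =====
-- def fab(n,list_a):
--     list_k = []
--     cnt = 0
--     result = 0
--     for i in list_a:
--         cnt = cnt + i
--         if cnt >= 360:
--             cnt = cnt - 360
--         list_k.append(cnt)
--     list_k.append(0)
--     list_k.append(360)
--     list_k.sort(key=None,reverse=False)
--     for i in range(len(list_k)):
--         if i == 0:
--             continue
--         else:
--             d = list_k[i] - list_k[i - 1]
--         if result < d:
--             result = d
--     return result
-- ===== SOURCE B (Python) =====
-- def fab(n, list_a):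
--     cuts = [0, 360]
--     cnt = 0
--     for a in list_a:
--         cnt = cnt + a
--         if cnt >= 360:
--             cnt = cnt - 360
--         cuts.append(cnt)
--     best = 0
--     for c in cuts:
--         succ = None
--         for x in cuts:
--             if x > c and (succ is None or x < succ):
--                 succ = x
--         if succ is not None and succ - c > best:
--             best = succ - c
--     return best
-- ===== Notes on version B (the rewrite author's own statement) =====
-- stated objective: alternative
-- what changed: B never sorts the cut positions: for each cut it scans the whole cut list for the least strictly greater cut and returns the maximum of these successor gaps, instead of sorting and taking the max adjacent difference.
import Mathlib
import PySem

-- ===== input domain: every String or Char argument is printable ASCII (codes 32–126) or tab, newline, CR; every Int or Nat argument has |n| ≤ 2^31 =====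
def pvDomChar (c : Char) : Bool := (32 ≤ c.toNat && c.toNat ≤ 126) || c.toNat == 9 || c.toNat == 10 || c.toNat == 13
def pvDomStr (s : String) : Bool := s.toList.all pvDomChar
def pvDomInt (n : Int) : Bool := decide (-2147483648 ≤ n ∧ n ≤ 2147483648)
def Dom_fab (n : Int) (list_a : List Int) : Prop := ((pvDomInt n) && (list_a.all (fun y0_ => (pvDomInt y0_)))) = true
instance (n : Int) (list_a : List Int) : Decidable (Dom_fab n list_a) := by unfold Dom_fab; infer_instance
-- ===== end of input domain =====

-- B never sorts: for every cut position it scans the cut list for the least strictly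
-- greater cut and takes the maximum successor gap (selection-based, O(n^2));
-- alternative algorithm, same return value, no speed claim.

-- ===== PORT A =====
def fab (n : Int) (list_a : List Int) : Int :=
  let s := list_a.foldl (fun (s : Int × List Int) i =>
      let cnt := s.1 + i
      let cnt := if cnt ≥ 360 then cnt - 360 else cnt
      (cnt, s.2 ++ [cnt])) (0, [])
  let list_k := PySem.List.sorted (s.2 ++ [0] ++ [360]) (fun x => x) false
  (PySem.List.pyRange 0 (PySem.List.len list_k) 1).foldl
    (fun result i =>
      if i = 0 then result
      else
        let d := PySem.List.pyGetD list_k i 0 - PySem.List.pyGetD list_k (i - 1) 0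
        if result < d then d else result) 0

-- ===== PORT B =====
-- the inner 'for x in cuts' loop of Source B: running least cut strictly greater than c
def succStep (c : Int) (succ : Option Int) (x : Int) : Option Int :=
  if x > c && (match succ with | none => true | some s => decide (x < s)) then some x else succ

def fabSucc (cuts : List Int) (c : Int) : Option Int := cuts.foldl (succStep c) none

def fab_alt (n : Int) (list_a : List Int) : Int :=
  let s := list_a.foldl (fun (s : Int × List Int) a =>
      let cnt := s.1 + a
      let cnt := if cnt ≥ 360 then cnt - 360 else cnt
      (cnt, s.2 ++ [cnt])) (0, [0, 360])
  let cuts := s.2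
  cuts.foldl (fun best c =>
      match fabSucc cuts c with
      | some sc => if sc - c > best then sc - c else best
      | none => best) 0

-- ===== PRECONDITION & SPEC =====
def Spec_fab (n : Int) (list_a : List Int) (out : Int) : Prop := out = fab_alt n list_a
instance (n : Int) (list_a : List Int) (out : Int) : Decidable (Spec_fab n list_a out) := by unfold Spec_fab; infer_instance

-- ===== CLAIM (what is proved, stated in full; the proofs are below) =====
def Claim_equal_fab : Prop := ∀ (n : Int) (list_a : List Int), Dom_fab n list_a → Spec_fab n list_a (fab n list_a)

-- ===== LEMMAS AND PROOFS =====

-- the cumulative loop only appends: its list component factors through the accumulator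
theorem fab_loop_acc (l : List Int) (c : Int) (p : List Int) :
    (l.foldl (fun (s : Int × List Int) i =>
        let cnt := s.1 + i
        let cnt := if cnt ≥ 360 then cnt - 360 else cnt
        (cnt, s.2 ++ [cnt])) (c, p)).2
    = p ++ (l.foldl (fun (s : Int × List Int) i =>
        let cnt := s.1 + i
        let cnt := if cnt ≥ 360 then cnt - 360 else cnt
        (cnt, s.2 ++ [cnt])) (c, ([] : List Int))).2 := by
  induction l generalizing c p with
  | nil => simp
  | cons x t ih =>
    simp only [List.foldl_cons]
    conv_lhs => rw [ih]
    conv_rhs => rw [ih]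
    simp

-- A's index scan over list_k is the adjacent-pair scan
theorem fab_scan_eq (k : List Int) :
    (PySem.List.pyRange 0 (PySem.List.len k) 1).foldl
      (fun result i =>
        if i = 0 then result
        else
          let d := PySem.List.pyGetD k i 0 - PySem.List.pyGetD k (i - 1) 0
          if result < d then d else result) 0
    = (k.zip k.tail).foldl
        (fun best p => if p.2 - p.1 > best then p.2 - p.1 else best) 0 := by
  rcases k with _ | ⟨x, t⟩
  · simp [PySem.List.len_eq]
  · rw [PySem.List.len_eq, List.length_cons, PySem.List.pyRange_zero_natCast,
      List.range_succ_eq_map]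
    simp only [List.map_cons, List.map_map, List.foldl_cons, List.foldl_map,
      Function.comp]
    norm_num
    rw [List.foldl_ext _
      (fun (r : Int) (y : ℕ) =>
        (fun (r : Int) (d : Int) => if r < d then d else r) r
          ((x :: t).getD (y + 1) 0 - (x :: t).getD y 0)) 0
      (by
        intro r y _
        have h1 : ((y : Int) + 1) = ((y + 1 : ℕ) : Int) := by push_cast; ring
        rw [h1, PySem.List.pyGetD_natCast]
        simp only [List.getD]
        rw [if_neg (by omega)])]
    rw [← List.foldl_map (f := fun y : ℕ => (x :: t).getD (y + 1) 0 - (x :: t).getD y 0)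
      (g := fun (r : Int) (d : Int) => if r < d then d else r)]
    have hmap : (List.range t.length).map
        (fun j => (x :: t).getD (j + 1) 0 - (x :: t).getD j 0)
        = ((x :: t).zip (x :: t).tail).map (fun p => p.2 - p.1) := by
      apply List.ext_getElem
      · simp [List.length_zip]
      · intro i h1 h2
        simp only [List.getElem_map, List.getElem_range, List.getElem_zip,
          List.getElem_tail]
        have hi : i < t.length := by simpa using h1
        rw [List.getD_eq_getElem _ _ (by simp; omega),
            List.getD_eq_getElem _ _ (by simp; omega)]
    rw [hmap, List.foldl_map]
    simp

-- reduction equations for one step of the inner successor loop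
theorem succStep_none (c x : Int) :
    succStep c none x = if c < x then some x else none := by
  by_cases h : c < x <;> simp [succStep, h]

theorem succStep_some (c x t0 : Int) :
    succStep c (some t0) x = if c < x ∧ x < t0 then some x else some t0 := by
  by_cases h1 : c < x <;> by_cases h2 : x < t0 <;> simp [succStep, h1, h2]

-- soundness + minimality of the inner successor loop
theorem succ_fold_some (c : Int) (l : List Int) : ∀ (acc : Option Int) (s : Int),
    l.foldl (succStep c) acc = some s →
    ((s ∈ l ∧ c < s) ∨ acc = some s) ∧ (∀ x ∈ l, c < x → s ≤ x) ∧
      (∀ t, acc = some t → s ≤ t) := by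
  induction l with
  | nil =>
    intro acc s h; simp at h
    exact ⟨Or.inr h, by simp, fun t ht => by rw [h] at ht; simp at ht; omega⟩
  | cons x t ih =>
    intro acc s h
    rw [List.foldl_cons] at h
    rcases acc with _ | t0
    · rw [succStep_none] at h
      by_cases hcx : c < x
      · rw [if_pos hcx] at h
        obtain ⟨h1, h2, h3⟩ := ih (some x) s h
        have hsx : s ≤ x := h3 x rfl
        refine ⟨?_, ?_, by simp⟩
        · rcases h1 with h1 | h1
          · exact Or.inl ⟨List.mem_cons_of_mem _ h1.1, h1.2⟩
          · simp at h1; subst h1; exact Or.inl ⟨List.mem_cons_self, hcx⟩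
        · intro y hy hcy
          rcases List.mem_cons.1 hy with rfl | hy'
          · exact hsx
          · exact h2 y hy' hcy
      · rw [if_neg hcx] at h
        obtain ⟨h1, h2, _⟩ := ih none s h
        refine ⟨?_, ?_, by simp⟩
        · rcases h1 with h1 | h1
          · exact Or.inl ⟨List.mem_cons_of_mem _ h1.1, h1.2⟩
          · simp at h1
        · intro y hy hcy
          rcases List.mem_cons.1 hy with rfl | hy'
          · exact absurd hcy hcx
          · exact h2 y hy' hcy
    · rw [succStep_some] at h
      by_cases hcx : c < x ∧ x < t0
      · rw [if_pos hcx] at h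
        obtain ⟨h1, h2, h3⟩ := ih (some x) s h
        have hsx : s ≤ x := h3 x rfl
        refine ⟨?_, ?_, ?_⟩
        · rcases h1 with h1 | h1
          · exact Or.inl ⟨List.mem_cons_of_mem _ h1.1, h1.2⟩
          · simp at h1; subst h1; exact Or.inl ⟨List.mem_cons_self, hcx.1⟩
        · intro y hy hcy
          rcases List.mem_cons.1 hy with rfl | hy'
          · exact hsx
          · exact h2 y hy' hcy
        · intro t1 ht1; simp at ht1; subst ht1; omega
      · rw [if_neg hcx] at h
        obtain ⟨h1, h2, h3⟩ := ih (some t0) s h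
        have hst0 : s ≤ t0 := h3 t0 rfl
        refine ⟨?_, ?_, ?_⟩
        · rcases h1 with h1 | h1
          · exact Or.inl ⟨List.mem_cons_of_mem _ h1.1, h1.2⟩
          · exact Or.inr h1
        · intro y hy hcy
          rcases List.mem_cons.1 hy with rfl | hy'
          · have ht0y : t0 ≤ y := by
              by_contra hn
              exact hcx ⟨hcy, by omega⟩
            omega
          · exact h2 y hy' hcy
        · intro t1 ht1; simp at ht1; subst ht1; exact hst0

theorem succ_fold_none (c : Int) (l : List Int) : ∀ (acc : Option Int),
    l.foldl (succStep c) acc = none → acc = none ∧ ∀ x ∈ l, ¬ c < x := by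
  induction l with
  | nil => intro acc h; simpa using h
  | cons x t ih =>
    intro acc h
    rw [List.foldl_cons] at h
    rcases acc with _ | t0
    · rw [succStep_none] at h
      by_cases hcx : c < x
      · rw [if_pos hcx] at h
        obtain ⟨h1, _⟩ := ih _ h
        simp at h1
      · rw [if_neg hcx] at h
        obtain ⟨_, h2⟩ := ih _ h
        refine ⟨rfl, fun y hy => ?_⟩
        rcases List.mem_cons.1 hy with rfl | hy'
        · exact hcx
        · exact h2 y hy'
    · rw [succStep_some] at h
      split_ifs at h with hcx
      all_goals obtain ⟨h1, _⟩ := ih _ h; simp at h1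

theorem fabSucc_some_spec (l : List Int) (c s : Int) (h : fabSucc l c = some s) :
    s ∈ l ∧ c < s ∧ ∀ x ∈ l, c < x → s ≤ x := by
  obtain ⟨h1, h2, _⟩ := succ_fold_some c l none s h
  rcases h1 with h1 | h1
  · exact ⟨h1.1, h1.2, h2⟩
  · simp at h1

theorem fabSucc_eq_some (l : List Int) (c s : Int) (hmem : s ∈ l) (hlt : c < s)
    (hmin : ∀ x ∈ l, c < x → s ≤ x) : fabSucc l c = some s := by
  rcases hres : fabSucc l c with _ | s'
  · obtain ⟨_, h2⟩ := succ_fold_none c l none hres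
    exact absurd hlt (h2 s hmem)
  · obtain ⟨hm', hlt', hmin'⟩ := fabSucc_some_spec l c s' hres
    have : s = s' := le_antisymm (hmin s' hm' hlt') (hmin' s hmem hlt)
    rw [this]

-- foldl max bounds
theorem foldl_max_le_iff (l : List Int) : ∀ (a b : Int),
    l.foldl max a ≤ b ↔ a ≤ b ∧ ∀ x ∈ l, x ≤ b := by
  induction l with
  | nil => intro a b; simp
  | cons x t ih =>
    intro a b
    rw [List.foldl_cons, ih]
    constructor
    · rintro ⟨h1, h2⟩
      exact ⟨le_trans (le_max_left a x) h1, fun y hy => by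
        rcases List.mem_cons.1 hy with rfl | hy'
        · exact le_trans (le_max_right a y) h1
        · exact h2 y hy'⟩
    · rintro ⟨h1, h2⟩
      exact ⟨max_le h1 (h2 x (List.mem_cons_self)), fun y hy => h2 y (List.mem_cons_of_mem _ hy)⟩

theorem le_foldl_max_self (l : List Int) (a : Int) : a ≤ l.foldl max a :=
  ((foldl_max_le_iff l a _).1 le_rfl).1

theorem mem_le_foldl_max (l : List Int) (a x : Int) (hx : x ∈ l) : x ≤ l.foldl max a :=
  ((foldl_max_le_iff l a _).1 le_rfl).2 x hx

-- A's adjacent-pair scan is a foldl max over the gap values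
theorem zip_fold_eq_max (l : List (Int × Int)) : ∀ b : Int,
    l.foldl (fun best p => if p.2 - p.1 > best then p.2 - p.1 else best) b
      = (l.map (fun p => p.2 - p.1)).foldl max b := by
  induction l with
  | nil => intro b; rfl
  | cons p t ih =>
    intro b
    rw [List.foldl_cons, List.map_cons, List.foldl_cons, ih]
    congr 1
    rw [max_def]
    split_ifs <;> omega

-- B's outer loop is a foldl max over the successor-gap values (best stays ≥ 0)
theorem alt_fold_eq_max (cuts : List Int) (l : List Int) : ∀ b : Int, 0 ≤ b →
    l.foldl (fun best c =>
        match fabSucc cuts c with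
        | some sc => if sc - c > best then sc - c else best
        | none => best) b
      = (l.map (fun c =>
          match fabSucc cuts c with
          | some sc => sc - c
          | none => 0)).foldl max b := by
  induction l with
  | nil => intro b _; rfl
  | cons c t ih =>
    intro b hb
    rw [List.foldl_cons, List.map_cons, List.foldl_cons]
    rcases hsc : fabSucc cuts c with _ | sc <;> dsimp only
    · rw [ih b hb, max_eq_left hb]
    · have h1 : (if sc - c > b then sc - c else b) = max b (sc - c) := by
        rw [max_def]; split_ifs <;> omega
      rw [h1, ih _ (le_trans hb (le_max_left _ _))]

-- the heart: over a sorted list, the max adjacent gap equals the max successor gap,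
-- and the successor gaps only depend on membership (so any permutation l works)
theorem gaps_eq_succ (k l : List Int) (hperm : l.Perm k) (hsort : k.Pairwise (· ≤ ·)) :
    ((k.zip k.tail).map (fun p => p.2 - p.1)).foldl max 0
      = (l.map (fun c =>
          match fabSucc l c with
          | some sc => sc - c
          | none => 0)).foldl max 0 := by
  have hmono : ∀ (i j : ℕ) (hi : i < k.length) (hj : j < k.length), i ≤ j → k[i] ≤ k[j] := by
    intro i j hi hj hij
    rcases Nat.lt_or_ge i j with h | h
    · exact (List.pairwise_iff_getElem.1 hsort) i j hi hj h
    · have : i = j := le_antisymm hij h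
      subst this; exact le_rfl
  apply le_antisymm
  · rw [foldl_max_le_iff]
    refine ⟨le_foldl_max_self _ _, ?_⟩
    intro g hg
    rcases List.mem_map.1 hg with ⟨p, hp, rfl⟩
    rcases List.mem_iff_getElem.1 hp with ⟨i, hi, hpi⟩
    have hi1 : i + 1 < k.length := by
      have := hi; rw [List.length_zip, List.length_tail] at this; omega
    have hpe : p = (k[i]'(by omega), k[i+1]'hi1) := by
      rw [← hpi]
      rw [List.getElem_zip]
      congr 1
      rw [List.getElem_tail]
    subst hpe
    simp only
    by_cases hle : k[i+1]'hi1 - k[i]'(by omega) ≤ 0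
    · exact le_trans hle (le_foldl_max_self _ _)
    · have hgt : k[i]'(by omega) < k[i+1]'hi1 := by omega
      have hsucc : fabSucc l (k[i]'(by omega)) = some (k[i+1]'hi1) := by
        apply fabSucc_eq_some
        · exact hperm.mem_iff.2 (List.getElem_mem hi1)
        · omega
        · intro x hx hcx
          rcases List.mem_iff_getElem.1 (hperm.mem_iff.1 hx) with ⟨j, hj, rfl⟩
          have hij : i < j := by
            by_contra hn
            have := hmono j i hj (by omega) (by omega)
            omega
          exact hmono (i+1) j hi1 hj (by omega)
      have hmem : (k[i+1]'hi1 - k[i]'(by omega)) ∈ l.map (fun c =>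
          match fabSucc l c with
          | some sc => sc - c
          | none => 0) := by
        refine List.mem_map.2 ⟨k[i]'(by omega), hperm.mem_iff.2 (List.getElem_mem (by omega)), ?_⟩
        rw [hsucc]
      exact mem_le_foldl_max _ _ _ hmem
  · rw [foldl_max_le_iff]
    refine ⟨le_foldl_max_self _ _, ?_⟩
    intro v hv
    rcases List.mem_map.1 hv with ⟨c, hc, rfl⟩
    rcases hsc : fabSucc l c with _ | sc
    · exact le_trans le_rfl (by simpa using le_foldl_max_self (((k.zip k.tail).map (fun p => p.2 - p.1))) 0)
    · simp only
      obtain ⟨hscm, hlt, hmin⟩ := fabSucc_some_spec l c sc hsc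
      -- least index j with c < k[j]
      have hck : c ∈ k := hperm.mem_iff.1 hc
      have hsck : sc ∈ k := hperm.mem_iff.1 hscm
      rcases List.mem_iff_getElem.1 hsck with ⟨js, hjs, hjseq⟩
      have hP : ∃ j, c < k.getD j c := ⟨js, by rw [List.getD_eq_getElem _ _ hjs, hjseq]; exact hlt⟩
      classical
      let j := Nat.find hP
      have hjspec : c < k.getD j c := Nat.find_spec hP
      have hjlen : j < k.length := by
        by_contra hn
        rw [List.getD_eq_default _ _ (by omega)] at hjspec
        omega
      have hj0 : 0 < j := by
        rcases Nat.eq_zero_or_pos j with h0 | h0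
        · exfalso
          rcases List.mem_iff_getElem.1 hck with ⟨ic, hic, hiceq⟩
          have : k.getD 0 c ≤ c := by
            rw [List.getD_eq_getElem _ _ (by omega)]
            calc k[0]'(by omega) ≤ k[ic] := hmono 0 ic (by omega) hic (by omega)
            _ = c := hiceq
          rw [h0] at hjspec; omega
        · exact h0
      have hjprev : k.getD (j-1) c ≤ c := by
        have := Nat.find_min hP (m := j - 1) (by omega)
        omega
      have hjprev' : (k[j-1]'(by omega)) ≤ c := by
        rw [List.getD_eq_getElem _ _ (by omega)] at hjprev; exact hjprev
      have hjval : c < k[j]'hjlen := by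
        rw [List.getD_eq_getElem _ _ hjlen] at hjspec; exact hjspec
      have hscj : sc ≤ k[j]'hjlen := hmin _ (hperm.mem_iff.2 (List.getElem_mem hjlen)) hjval
      have hzlen : j - 1 < (k.zip k.tail).length := by
        rw [List.length_zip, List.length_tail]; omega
      have hgmem : ((k[j-1]'(by omega), k[j]'hjlen) : Int × Int) ∈ k.zip k.tail := by
        have : (k.zip k.tail)[j-1]'hzlen = (k[j-1]'(by omega), k[j]'hjlen) := by
          rw [List.getElem_zip]
          congr 1
          rw [List.getElem_tail]
          congr 1
          omega
        exact this ▸ List.getElem_mem hzlen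
      have hvmem : (k[j]'hjlen - k[j-1]'(by omega)) ∈ (k.zip k.tail).map (fun p => p.2 - p.1) :=
        List.mem_map.2 ⟨_, hgmem, rfl⟩
      have hle := mem_le_foldl_max ((k.zip k.tail).map (fun p => p.2 - p.1)) 0 _ hvmem
      linarith [hle, hscj, hjprev']

-- ===== VERDICT (by name: the statement is the Claim_ definition above) =====
theorem fab_spec : Claim_equal_fab := by
  intro n list_a _
  unfold Spec_fab fab fab_alt
  dsimp only
  have hcuts : (list_a.foldl (fun (s : Int × List Int) a =>
      let cnt := s.1 + a
      let cnt := if cnt ≥ 360 then cnt - 360 else cnt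
      (cnt, s.2 ++ [cnt])) (0, [0, 360])).2
      = [0, 360] ++ (list_a.foldl (fun (s : Int × List Int) i =>
      let cnt := s.1 + i
      let cnt := if cnt ≥ 360 then cnt - 360 else cnt
      (cnt, s.2 ++ [cnt])) (0, ([] : List Int))).2 := fab_loop_acc list_a 0 [0, 360]
  rw [fab_scan_eq, zip_fold_eq_max, hcuts, alt_fold_eq_max _ _ 0 le_rfl]
  apply gaps_eq_succ
  · -- cuts ~ sorted input list
    refine List.Perm.trans ?_ (PySem.List.sorted_perm _ _ _).symm
    rw [List.append_assoc]
    exact List.perm_append_comm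
  · have := PySem.List.sorted_pairwise (xs := ((list_a.foldl (fun (s : Int × List Int) i =>
        let cnt := s.1 + i
        let cnt := if cnt ≥ 360 then cnt - 360 else cnt
        (cnt, s.2 ++ [cnt])) (0, ([] : List Int))).2 ++ [0] ++ [360])) (key := fun x => x)
    simpa using this
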